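-- pv_equiv track=rewrite | github.com/ministryofjustice/modernisation-platform-configuration-management | ansible/roles/ncr-bip/templates/home/bobj/compare_cmsobjects.py | parse_java_cmdline
-- ===== SOURCE A (Python) =====
-- def parse_java_cmdline(cmdline):
--     args = cmdline.split(" ")
--     current_arg_sequence = []
--     split_args = []
--     for arg in args[1:]:
--         if arg[0] == "-":
--             if current_arg_sequence:
--                 split_args.append(" ".join(current_arg_sequence))
--             current_arg_sequence = ["", arg]
--         else:
--             current_arg_sequence.append(arg)
--     if current_arg_sequence:
--         split_args.append(" ".join(current_arg_sequence))
--     return [args[0]] + sorted(split_args)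
-- ===== SOURCE B (Python) =====
-- def _take_run(toks):
--     """Split toks into (run, rest): run is the maximal leading prefix of
--     tokens not starting with '-', rest is everything from the first dash on."""
--     run = []
--     for i, t in enumerate(toks):
--         if t[0] == "-":
--             return run, toks[i:]
--         run.append(t)
--     return run, []
--
--
-- def parse_java_cmdline(cmdline):
--     args = cmdline.split(" ")
--     run, rest = _take_run(args[1:])
--     groups = [" ".join(run)] if run else []
--     while rest:
--         # rest[0] starts with "-": it opens the next group
--         head, tail = rest[0], rest[1:]
--         body, rest = _take_run(tail)
--         groups.append(" ".join(["", head, *body]))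
--     return [args[0]] + sorted(groups)
-- ===== Notes on version B (the rewrite author's own statement) =====
-- stated objective: alternative
-- what changed: A builds groups with a running accumulator inside one fold; B decomposes the token list into segments explicitly (split off the leading non-dash run, then repeatedly peel one dash-led group with a take-run helper).
import Mathlib
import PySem

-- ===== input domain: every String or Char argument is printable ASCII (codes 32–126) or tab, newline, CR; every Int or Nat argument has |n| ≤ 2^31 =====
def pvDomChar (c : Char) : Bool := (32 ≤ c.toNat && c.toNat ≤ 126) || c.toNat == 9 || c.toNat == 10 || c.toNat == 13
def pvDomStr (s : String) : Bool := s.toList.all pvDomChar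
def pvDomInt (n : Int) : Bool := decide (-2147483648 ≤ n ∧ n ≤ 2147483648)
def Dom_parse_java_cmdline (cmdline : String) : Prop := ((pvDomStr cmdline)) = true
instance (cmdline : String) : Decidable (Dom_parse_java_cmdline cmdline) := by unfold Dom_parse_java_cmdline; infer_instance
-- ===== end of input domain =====

-- B replaces A's running-accumulator fold by an explicit segment decomposition
-- (split off the leading non-dash run, then peel one dash-led group at a time);
-- objective: alternative decomposition, same cost.


-- ===== PORT A =====
-- the body of A's for-loop over args[1:]; state = (current_arg_sequence, split_args)
def pvStepA (st : List String × List String) (arg : String) : List String × List String :=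
  if PySem.Str.pyGet? arg 0 = some '-' then
    (["", arg], if st.1 = [] then st.2 else st.2 ++ [PySem.Str.join " " st.1])
  else
    (st.1 ++ [arg], st.2)

def parse_java_cmdline (cmdline : String) : List String :=
  let args := (PySem.Str.split? cmdline " ").getD [""]
  let st := args.tail.foldl pvStepA ([], [])
  let split_args := if st.1 = [] then st.2 else st.2 ++ [PySem.Str.join " " st.1]
  [args.headD ""] ++ PySem.List.sorted split_args (fun x => x) false

-- ===== PORT B =====
-- _take_run: maximal leading prefix of tokens not starting with '-', and the rest
def pvTakeRun : List String → List String × List String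
  | [] => ([], [])
  | t :: ts =>
    if PySem.Str.pyGet? t 0 = some '-' then ([], t :: ts)
    else (t :: (pvTakeRun ts).1, (pvTakeRun ts).2)

-- termination measure for the while loop: _take_run's remainder never grows
theorem pvTakeRun_snd_length_le (l : List String) : (pvTakeRun l).2.length ≤ l.length := by
  induction l with
  | nil => simp [pvTakeRun]
  | cons t ts ih =>
    simp only [pvTakeRun]
    split
    · simp
    · simp only [List.length_cons]; omega

-- the while loop of B: peel one dash-led group per iteration
def pvDashLoop : List String → List String
  | [] => []
  | h :: tail =>
    PySem.Str.join " " ("" :: h :: (pvTakeRun tail).1) :: pvDashLoop (pvTakeRun tail).2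
termination_by l => l.length
decreasing_by
  have := pvTakeRun_snd_length_le tail
  simp
  omega

def parse_java_cmdline_alt (cmdline : String) : List String :=
  let args := (PySem.Str.split? cmdline " ").getD [""]
  let run := (pvTakeRun args.tail).1
  let rest := (pvTakeRun args.tail).2
  let groups := (if run = [] then [] else [PySem.Str.join " " run]) ++ pvDashLoop rest
  [args.headD ""] ++ PySem.List.sorted groups (fun x => x) false

-- ===== PRECONDITION & SPEC =====
-- Pre_ excludes command lines whose split produces an empty token after the first
-- (double/trailing spaces): there Python A raises IndexError on arg[0].
def Pre_parse_java_cmdline (cmdline : String) : Prop :=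
  ∀ t ∈ ((PySem.Str.split? cmdline " ").getD [""]).tail, t ≠ ""
instance (cmdline : String) : Decidable (Pre_parse_java_cmdline cmdline) := by
  unfold Pre_parse_java_cmdline; infer_instance

def pvWitness_parse_java_cmdline : String := "java -Xmx2g -jar app.jar"

def Spec_parse_java_cmdline (cmdline : String) (out : List String) : Prop := out = parse_java_cmdline_alt cmdline
instance (cmdline : String) (out : List String) : Decidable (Spec_parse_java_cmdline cmdline out) := by unfold Spec_parse_java_cmdline; infer_instance

-- ===== CLAIM (what is proved, stated in full; the proofs are below) =====
def Claim_equal_parse_java_cmdline : Prop := ∀ (cmdline : String), Dom_parse_java_cmdline cmdline → Pre_parse_java_cmdline cmdline → Spec_parse_java_cmdline cmdline (parse_java_cmdline cmdline)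

-- ===== LEMMAS AND PROOFS =====

-- A's loop characterised recursively: pvG cur toks is what finalising A's fold
-- (started with current_arg_sequence = cur, split_args = []) appends to split_args.
def pvG (cur : List String) : List String → List String
  | [] => if cur = [] then [] else [PySem.Str.join " " cur]
  | a :: t =>
    if PySem.Str.pyGet? a 0 = some '-' then
      (if cur = [] then [] else [PySem.Str.join " " cur]) ++ pvG ["", a] t
    else
      pvG (cur ++ [a]) t

theorem pvFold_char (toks : List String) : ∀ (cur sa : List String),
    (let st := toks.foldl pvStepA (cur, sa);
     if st.1 = [] then st.2 else st.2 ++ [PySem.Str.join " " st.1])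
    = sa ++ pvG cur toks := by
  induction toks with
  | nil => intro cur sa; by_cases h : cur = [] <;> simp [pvG, h]
  | cons a t ih =>
    intro cur sa
    rw [List.foldl_cons]
    by_cases hd : PySem.Str.pyGet? a 0 = some '-'
    · by_cases h : cur = []
      · have e : pvStepA (cur, sa) a = (["", a], sa) := by
          simp only [pvStepA]; rw [if_pos hd, if_pos h]
        rw [e, ih]
        congr 1
        simp only [pvG]
        rw [if_pos hd, if_pos h]
        simp
      · have e : pvStepA (cur, sa) a = (["", a], sa ++ [PySem.Str.join " " cur]) := by
          simp only [pvStepA]; rw [if_pos hd, if_neg h]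
        have g : pvG cur (a :: t) = [PySem.Str.join " " cur] ++ pvG ["", a] t := by
          simp only [pvG]; rw [if_pos hd, if_neg h]
        rw [e, ih, g, List.append_assoc]
    · have e : pvStepA (cur, sa) a = (cur ++ [a], sa) := by
        simp only [pvStepA]; rw [if_neg hd]
      have g : pvG cur (a :: t) = pvG (cur ++ [a]) t := by
        simp only [pvG]; rw [if_neg hd]
      rw [e, ih, g]

theorem pvG_cons (toks : List String) : ∀ (cur : List String), cur ≠ [] →
    pvG cur toks
      = PySem.Str.join " " (cur ++ (pvTakeRun toks).1) :: pvDashLoop (pvTakeRun toks).2 := by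
  induction toks with
  | nil =>
    intro cur h
    simp only [pvG, pvTakeRun, pvDashLoop]
    rw [if_neg h]
    simp
  | cons a t ih =>
    intro cur h
    by_cases hd : PySem.Str.pyGet? a 0 = some '-'
    · have g : pvG cur (a :: t) = [PySem.Str.join " " cur] ++ pvG ["", a] t := by
        simp only [pvG]; rw [if_pos hd, if_neg h]
      have e : pvTakeRun (a :: t) = ([], a :: t) := by
        simp only [pvTakeRun]; rw [if_pos hd]
      rw [g, ih ["", a] (by simp), e]
      simp only [pvDashLoop]
      simp
    · have g : pvG cur (a :: t) = pvG (cur ++ [a]) t := by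
        simp only [pvG]; rw [if_neg hd]
      have e : pvTakeRun (a :: t) = (a :: (pvTakeRun t).1, (pvTakeRun t).2) := by
        simp only [pvTakeRun]; rw [if_neg hd]
      rw [g, ih (cur ++ [a]) (by simp), e]
      simp

theorem pvG_nil (toks : List String) :
    pvG [] toks
      = (if (pvTakeRun toks).1 = [] then [] else [PySem.Str.join " " (pvTakeRun toks).1])
        ++ pvDashLoop (pvTakeRun toks).2 := by
  cases toks with
  | nil => simp [pvG, pvTakeRun, pvDashLoop]
  | cons a t =>
    by_cases hd : PySem.Str.pyGet? a 0 = some '-'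
    · have g : pvG [] (a :: t) = pvG ["", a] t := by
        simp only [pvG]; rw [if_pos hd]; simp
      have e : pvTakeRun (a :: t) = ([], a :: t) := by
        simp only [pvTakeRun]; rw [if_pos hd]
      rw [g, pvG_cons t ["", a] (by simp), e]
      simp only [pvDashLoop]
      simp
    · have g : pvG [] (a :: t) = pvG [a] t := by
        simp only [pvG]; rw [if_neg hd]; simp
      have e : pvTakeRun (a :: t) = (a :: (pvTakeRun t).1, (pvTakeRun t).2) := by
        simp only [pvTakeRun]; rw [if_neg hd]
      rw [g, pvG_cons t [a] (by simp), e]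
      simp

-- ===== VERDICT (by name: the statement is the Claim_ definition above) =====
theorem parse_java_cmdline_spec : Claim_equal_parse_java_cmdline := by
  intro cmdline _ _
  unfold Spec_parse_java_cmdline parse_java_cmdline parse_java_cmdline_alt
  have h := pvFold_char (((PySem.Str.split? cmdline " ").getD [""]).tail) [] []
  simp only at h
  simp only [h, List.nil_append, pvG_nil]
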